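-- pv_equiv track=rewrite | github.com/genepii/seqmet-rsv | script/rsv/gen_techval.py | filter_table
-- ===== SOURCE A (Python) =====
-- def filter_table(table, filter_list):
--     outtable_index = []
--     outtable = []
--     for i in range(len(table[0])):
--         if any(f for f in filter_list if f in table[0][i]):
--             outtable_index.append(i)
--     for i in range(len(table)):
--         outtable.append([])
--     for i in range(len(table)):
--        for j in range(len(outtable_index)):
--            outtable[i].append(table[i][outtable_index[j]])
--     return outtable
-- ===== SOURCE B (Python) =====
-- def filter_table(table, filter_list):
--     cols = list(zip(*table))
--     kept = [c for c in cols if any(f and f in c[0] for f in filter_list)]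
--     if not kept:
--         return [[] for _ in table]
--     return [list(r) for r in zip(*kept)]
-- ===== Notes on version B (the rewrite author's own statement) =====
-- stated objective: idiomatic
-- what changed: B transposes the table with zip(*...), filters whole columns by their header in one comprehension, and transposes back, instead of A's index bookkeeping with three explicit loops and per-cell appends.
import Mathlib
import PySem

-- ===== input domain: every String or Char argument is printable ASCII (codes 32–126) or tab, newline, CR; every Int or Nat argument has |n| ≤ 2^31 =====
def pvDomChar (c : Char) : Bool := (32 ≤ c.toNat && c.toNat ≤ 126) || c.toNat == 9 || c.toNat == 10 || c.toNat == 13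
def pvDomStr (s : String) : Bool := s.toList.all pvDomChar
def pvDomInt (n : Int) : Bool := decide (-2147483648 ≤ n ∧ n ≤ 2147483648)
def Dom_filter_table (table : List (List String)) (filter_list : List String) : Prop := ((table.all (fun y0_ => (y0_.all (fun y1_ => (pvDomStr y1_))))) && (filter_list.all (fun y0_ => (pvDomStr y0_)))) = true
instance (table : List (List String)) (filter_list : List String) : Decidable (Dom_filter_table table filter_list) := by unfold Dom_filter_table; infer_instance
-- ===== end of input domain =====

-- B restructures A (three index loops with per-cell appends) as transpose → filter columns by header → transpose back; return values only (neither mutates).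

-- ===== PORT A =====
def filter_table (table : List (List String)) (filter_list : List String) : List (List String) :=
  let row0 := table.headI
  let idx : List Nat := (List.range row0.length).foldl
    (fun acc i =>
      if ((filter_list.filter (fun f => PySem.Str.isIn f (row0.getD i ""))).any (fun f => decide (f ≠ ""))) then acc ++ [i] else acc) []
  let ot0 : List (List String) := (List.range table.length).foldl (fun acc _ => acc ++ [([] : List String)]) []
  (List.range table.length).foldl
    (fun acc i => acc.set i ((List.range idx.length).foldl
        (fun r j => r ++ [(table.getD i []).getD (idx.getD j 0) ""]) (acc.getD i []))) ot0

-- ===== PORT B =====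
-- zip(*rows): columns truncated at the shortest row (exact Python zip semantics)
def pyZipT (rows : List (List String)) : List (List String) :=
  if h : rows = [] ∨ rows.any (fun r => r.isEmpty) then []
  else (rows.map (fun r => r.headI)) :: pyZipT (rows.map (fun r => r.tail))
termination_by rows.headI.length
decreasing_by
  cases rows with
  | nil => exact absurd (Or.inl rfl) h
  | cons r rs =>
    have hr : r ≠ [] := by
      intro hc
      exact h (Or.inr (by simp [hc]))
    simp [List.headI]
    cases r with
    | nil => exact absurd rfl hr
    | cons a t => simp

def filter_table_alt (table : List (List String)) (filter_list : List String) : List (List String) :=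
  let cols := pyZipT table
  let kept := cols.filter (fun c => filter_list.any (fun f => decide (f ≠ "") && PySem.Str.isIn f c.headI))
  if kept.isEmpty then table.map (fun _ => []) else pyZipT kept

-- ===== PRECONDITION & SPEC =====
def pvMatch (filter_list : List String) (s : String) : Bool :=
  filter_list.any (fun f => decide (f ≠ "") && PySem.Str.isIn f s)

-- Pre_ is exactly A's return domain: table nonempty (table[0]) and every selected
-- column index in range of every row (else table[i][j] raises IndexError).
def Pre_filter_table (table : List (List String)) (filter_list : List String) : Prop :=
  table ≠ [] ∧ ∀ i ∈ List.range table.headI.length,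
    pvMatch filter_list (table.headI.getD i "") = true → ∀ row ∈ table, i < row.length
instance (table : List (List String)) (filter_list : List String) : Decidable (Pre_filter_table table filter_list) := by
  unfold Pre_filter_table; infer_instance

def pvWitness_filter_table : List (List String) × List String := ([["ab", "c"], ["x", "y"]], ["a"])

def Spec_filter_table (table : List (List String)) (filter_list : List String) (out : List (List String)) : Prop := out = filter_table_alt table filter_list
instance (table : List (List String)) (filter_list : List String) (out : List (List String)) : Decidable (Spec_filter_table table filter_list out) := by unfold Spec_filter_table; infer_instance

-- ===== CLAIM (what is proved, stated in full; the proofs are below) =====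
def Claim_equal_filter_table : Prop := ∀ (table : List (List String)) (filter_list : List String), Dom_filter_table table filter_list → Pre_filter_table table filter_list → Spec_filter_table table filter_list (filter_table table filter_list)

-- ===== LEMMAS AND PROOFS =====

-- minimum row length (the number of columns zip(*rows) keeps)
def mlen : List (List String) → Nat
  | [] => 0
  | [r] => r.length
  | r :: rs => min r.length (mlen rs)

theorem mlen_le_head (r : List String) (rs : List (List String)) : mlen (r :: rs) ≤ r.length := by
  cases rs with
  | nil => simp [mlen]
  | cons s t => simp [mlen]

theorem lt_mlen (rows : List (List String)) (j : Nat) (hne : rows ≠ [])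
    (h : ∀ r ∈ rows, j < r.length) : j < mlen rows := by
  induction rows with
  | nil => exact absurd rfl hne
  | cons r rs ih =>
    cases rs with
    | nil => simpa [mlen] using h r (by simp)
    | cons s t =>
      simp only [mlen, lt_min_iff]
      exact ⟨h r (by simp), ih (by simp) (fun q hq => h q (by simp [hq]))⟩

theorem mlen_lt (rows : List (List String)) (j : Nat) (r : List String)
    (hr : r ∈ rows) (h : j < mlen rows) : j < r.length := by
  induction rows with
  | nil => simp at hr
  | cons a rs ih =>
    cases rs with
    | nil =>
      simp only [List.mem_cons, List.not_mem_nil, or_false] at hr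
      simpa [hr, mlen] using h
    | cons s t =>
      simp only [mlen, lt_min_iff] at h
      rcases List.mem_cons.mp hr with h1 | h1
      · simpa [h1] using h.1
      · exact ih h1 h.2

theorem mlen_const (rows : List (List String)) (L : Nat) (hne : rows ≠ [])
    (h : ∀ r ∈ rows, r.length = L) : mlen rows = L := by
  induction rows with
  | nil => exact absurd rfl hne
  | cons r rs ih =>
    cases rs with
    | nil => simpa [mlen] using h r (by simp)
    | cons s t =>
      have h1 : r.length = L := h r (by simp)
      have h2 : mlen (s :: t) = L := ih (by simp) (fun q hq => h q (by simp [hq]))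
      simp [mlen, h1, h2]

theorem mlen_tail (rows : List (List String)) (hne : rows ≠ [])
    (h : ∀ r ∈ rows, r ≠ []) : mlen (rows.map List.tail) = mlen rows - 1 := by
  induction rows with
  | nil => exact absurd rfl hne
  | cons r rs ih =>
    cases rs with
    | nil =>
      have := h r (by simp)
      simp [mlen, List.length_tail]
    | cons s t =>
      have h2 := ih (by simp) (fun q hq => h q (by simp [hq]))
      have hr := h r (by simp)
      have hs := h s (by simp)
      have hrl : 0 < r.length := List.length_pos_iff.mpr hr
      have hsl : 0 < mlen (s :: t) := by
        have : 0 < s.length := List.length_pos_iff.mpr hs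
        have := mlen_le_head s t
        -- need positivity of mlen (s :: t): every element nonempty
        exact lt_mlen (s :: t) 0 (by simp) (fun q hq => List.length_pos_iff.mpr (h q (by simp [hq])))
      simp only [List.map_cons, mlen, List.length_tail] at *
      omega

theorem one_le_mlen (rows : List (List String)) (hne : rows ≠ [])
    (h : ∀ r ∈ rows, r ≠ []) : 1 ≤ mlen rows :=
  lt_mlen rows 0 hne (fun q hq => List.length_pos_iff.mpr (h q hq))

theorem getD_zero_headI (r : List String) : r.getD 0 "" = r.headI := by
  cases r <;> rfl

-- characterisation of the transpose: column j collects entry j of every row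
theorem pyZipT_eq_aux (n : Nat) : ∀ rows : List (List String), rows ≠ [] → mlen rows = n →
    pyZipT rows = (List.range n).map (fun j => rows.map (fun r => r.getD j "")) := by
  induction n with
  | zero =>
    intro rows hne hm
    rw [pyZipT.eq_def]
    split
    · simp
    · rename_i h
      exfalso
      have hall : ∀ r ∈ rows, r ≠ [] := by
        intro r hr hc
        exact h (Or.inr (List.any_eq_true.mpr ⟨r, hr, by simp [hc]⟩))
      have := one_le_mlen rows hne hall
      omega
  | succ m ih =>
    intro rows hne hm
    rw [pyZipT.eq_def]
    split
    · rename_i h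
      rcases h with h | h
      · exact absurd h hne
      · exfalso
        obtain ⟨r, hr, hre⟩ := List.any_eq_true.mp h
        have hr0 : r.length = 0 := by simpa [List.isEmpty_iff] using hre
        have := mlen_lt rows 0 r hr (by omega)
        omega
    · rename_i h
      have hall : ∀ r ∈ rows, r ≠ [] := by
        intro r hr hc
        exact h (Or.inr (List.any_eq_true.mpr ⟨r, hr, by simp [hc]⟩))
      have hmap : rows.map List.tail ≠ [] := by
        intro hc
        exact hne (List.map_eq_nil_iff.mp hc)
      have hmt : mlen (rows.map List.tail) = m := by
        have := mlen_tail rows hne hall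
        omega
      rw [ih (rows.map List.tail) hmap hmt, List.range_succ_eq_map, List.map_cons, List.map_map]
      congr 1
      · exact (List.map_congr_left (fun r _ => (getD_zero_headI r).symm))
      · apply List.map_congr_left
        intro j _
        rw [List.map_map]
        exact List.map_congr_left (fun r _ => by simp [Function.comp])

theorem pyZipT_eq (rows : List (List String)) (hne : rows ≠ []) :
    pyZipT rows = (List.range (mlen rows)).map (fun j => rows.map (fun r => r.getD j "")) :=
  pyZipT_eq_aux (mlen rows) rows hne rfl

-- set-loop over range n on a list of length ≥ n builds the list of g-values
theorem foldl_set_range {α : Type} (n : Nat) (g : Nat → α → α) (d : α) (ot : List α) (hn : n ≤ ot.length) :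
    (List.range n).foldl (fun acc i => acc.set i (g i (acc.getD i d))) ot
      = (List.range n).map (fun i => g i (ot.getD i d)) ++ ot.drop n := by
  induction n with
  | zero => simp
  | succ m ih =>
    have hm : m ≤ ot.length := by omega
    have hml : m < ot.length := by omega
    rw [List.range_succ, List.foldl_append, List.foldl_cons, List.foldl_nil, ih hm]
    have hlen : ((List.range m).map (fun i => g i (ot.getD i d))).length = m := by simp
    have hdrop : ot.drop m = ot[m] :: ot.drop (m + 1) := List.drop_eq_getElem_cons hml
    rw [hdrop]
    rw [List.getD_append_right _ _ _ _ (by simp)]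
    rw [List.set_append_right _ _ (by simp)]
    simp only [hlen, Nat.sub_self, List.getD_cons_zero, List.set_cons_zero]
    rw [List.map_append]
    simp [List.getElem?_eq_getElem hml]

theorem foldl_append_nil_replicate {α : Type} (n : Nat) (x : α) :
    (List.range n).foldl (fun acc _ => acc ++ [x]) [] = List.replicate n x := by
  induction n with
  | zero => rfl
  | succ m ih => rw [List.range_succ, List.foldl_append, ih]; simp [List.replicate_succ']

theorem map_range_getD {α β : Type} (xs : List α) (h : α → β) (d : α) :
    (List.range xs.length).map (fun j => h (xs.getD j d)) = xs.map h := by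
  induction xs with
  | nil => rfl
  | cons a t ih =>
    rw [List.length_cons, List.range_succ_eq_map, List.map_cons, List.map_map]
    simp only [List.getD_cons_zero, Function.comp_def, Nat.succ_eq_add_one, List.getD_cons_succ]
    rw [ih, List.map_cons]

theorem filter_range_eq (p : Nat → Bool) (m M : Nat) (hmM : m ≤ M)
    (h : ∀ j, j < M → p j = true → j < m) :
    (List.range M).filter p = (List.range m).filter p := by
  obtain ⟨k, rfl⟩ := Nat.exists_eq_add_of_le hmM
  induction k with
  | zero => rfl
  | succ k ih =>
    have : m + (k + 1) = (m + k) + 1 := by omega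
    rw [this, List.range_succ, List.filter_append]
    have hp : p (m + k) = false := by
      by_contra hc
      have := h (m + k) (by omega) (by simpa using hc)
      omega
    have hrec := ih (by omega) (fun j hj hpj => h j (by omega) hpj)
    simp [hp, hrec]

theorem getD_map {α β : Type} (l : List α) (f : α → β) (i : Nat) (d : β) (d' : α)
    (h : i < l.length) : (l.map f).getD i d = f (l.getD i d') := by
  rw [List.getD_eq_getElem _ _ (by simpa using h), List.getD_eq_getElem _ _ h]
  simp

-- headI of a mapped nonempty list
theorem headI_map (table : List (List String)) (g : List String → String) (hne : table ≠ []) :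
    (table.map g).headI = g table.headI := by
  cases table with
  | nil => exact absurd rfl hne
  | cons r rs => rfl

-- A's inline any-over-filter predicate equals pvMatch
theorem predA_eq_pvMatch (fl : List String) (s : String) :
    ((fl.filter (fun f => PySem.Str.isIn f s)).any (fun f => decide (f ≠ ""))) = pvMatch fl s := by
  rw [List.any_filter]
  unfold pvMatch
  congr 1
  funext f
  exact Bool.and_comm _ _

theorem canonical_A (table : List (List String)) (fl : List String) :
    filter_table table fl
      = (List.range table.length).map (fun i =>
          ((List.range table.headI.length).filter (fun j => pvMatch fl (table.headI.getD j ""))).map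
            (fun j => (table.getD i []).getD j "")) := by
  unfold filter_table
  simp only [PySem.List.foldl_append_if, List.nil_append, List.map_id']
  rw [foldl_append_nil_replicate]
  have hfp : (List.range table.headI.length).filter
      (fun i => (fl.filter (fun f => PySem.Str.isIn f (table.headI.getD i ""))).any (fun f => decide (f ≠ "")))
      = (List.range table.headI.length).filter (fun j => pvMatch fl (table.headI.getD j "")) :=
    List.filter_congr (fun j _ => predA_eq_pvMatch fl _)
  rw [hfp]
  generalize (List.range table.headI.length).filter (fun j => pvMatch fl (table.headI.getD j "")) = sel
  rw [foldl_set_range table.length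
        (fun i old => (List.range sel.length).foldl (fun r j => r ++ [(table.getD i []).getD (sel.getD j 0) ""]) old)
        [] (List.replicate table.length []) (by simp)]
  have hdrop : (List.replicate table.length ([] : List String)).drop table.length = [] := by simp
  rw [hdrop, List.append_nil]
  apply List.map_congr_left
  intro i _
  have hrep : (List.replicate table.length ([] : List String)).getD i [] = [] := by
    rcases Nat.lt_or_ge i table.length with h | h
    · rw [List.getD_eq_getElem _ _ (by simpa using h)]; simp
    · rw [List.getD_eq_default _ _ (by simpa using h)]
  rw [hrep, PySem.List.foldl_append_singleton_eq_map, List.nil_append]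
  exact map_range_getD sel (fun v => (table.getD i []).getD v "") 0

theorem canonical_B (table : List (List String)) (fl : List String)
    (hne : table ≠ [])
    (hidx : ∀ i ∈ List.range table.headI.length,
      pvMatch fl (table.headI.getD i "") = true → ∀ row ∈ table, i < row.length) :
    filter_table_alt table fl
      = (List.range table.length).map (fun i =>
          ((List.range table.headI.length).filter (fun j => pvMatch fl (table.headI.getD j ""))).map
            (fun j => (table.getD i []).getD j "")) := by
  simp only [filter_table_alt]
  rw [pyZipT_eq table hne, List.filter_map]
  have hq : (List.range (mlen table)).filter
        ((fun c => fl.any (fun f => decide (f ≠ "") && PySem.Str.isIn f c.headI)) ∘ (fun j => table.map (fun r => r.getD j "")))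
      = (List.range (mlen table)).filter (fun j => pvMatch fl (table.headI.getD j "")) := by
    apply List.filter_congr
    intro j _
    simp only [Function.comp]
    rw [headI_map table _ hne]
    rfl
  rw [hq]
  have hm_le : mlen table ≤ table.headI.length := by
    cases table with
    | nil => exact absurd rfl hne
    | cons r rs => exact mlen_le_head r rs
  have hsel_eq : (List.range table.headI.length).filter (fun j => pvMatch fl (table.headI.getD j ""))
      = (List.range (mlen table)).filter (fun j => pvMatch fl (table.headI.getD j "")) :=
    filter_range_eq _ _ _ hm_le
      (fun j hj hp => lt_mlen table j hne (hidx j (List.mem_range.mpr hj) hp))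
  rw [← hsel_eq]
  by_cases hnil : (List.range table.headI.length).filter (fun j => pvMatch fl (table.headI.getD j "")) = []
  · rw [hnil]
    simp [List.map_const']
  · have hkept : (((List.range table.headI.length).filter (fun j => pvMatch fl (table.headI.getD j ""))).map
        (fun j => table.map (fun r => r.getD j ""))) ≠ [] := by
      simpa using hnil
    have hemp : (((List.range table.headI.length).filter (fun j => pvMatch fl (table.headI.getD j ""))).map
        (fun j => table.map (fun r => r.getD j ""))).isEmpty = false :=
      List.isEmpty_eq_false_iff.mpr hkept
    rw [hemp]
    simp only [Bool.false_eq_true, if_false]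
    rw [pyZipT_eq _ hkept]
    have hml : mlen (((List.range table.headI.length).filter (fun j => pvMatch fl (table.headI.getD j ""))).map
        (fun j => table.map (fun r => r.getD j ""))) = table.length := by
      apply mlen_const _ _ hkept
      intro r hr
      obtain ⟨j, hj, rfl⟩ := List.mem_map.mp hr
      simp
    rw [hml]
    apply List.map_congr_left
    intro i hi
    rw [List.map_map]
    apply List.map_congr_left
    intro j _
    simp only [Function.comp]
    exact getD_map table (fun r => r.getD j "") i "" [] (List.mem_range.mp hi)

-- ===== VERDICT (by name: the statement is the Claim_ definition above) =====
theorem filter_table_spec : Claim_equal_filter_table := by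
  intro table fl _hdom hpre
  obtain ⟨hne, hidx⟩ := hpre
  unfold Spec_filter_table
  rw [canonical_A table fl, canonical_B table fl hne hidx]
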